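-- pv_equiv track=rewrite | github.com/qifanyyy/JupyterNotebook | new_algs/Graph+algorithms/Coloring+algorithm/FuncionesGrafos.py | aplanaSolucion
-- ===== SOURCE A (Python) =====
-- def aplanaSolucion(solucion):
--     colores= list() #Será la solución pero con los colores entre 0 y el número máximo de colores
--     relacion= list() #Variable que usaremos para mantener la concordancia
--
--     for x in solucion:
--         if  len(colores)== 0: #Primera iteacion
--             i=0 #Color nuevo
--             colores.append(i) #Añadimos el color nuevo a la lista de colores
--             relacion.append(x) #Asociamos el index con el color que tenia en el cromosoma
--         else:
--             if x in relacion: #Si ya hemos asignado un color a ese número del cromosoma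
--                 pos= relacion.index(x) #Tomamos la posición que tenga en la relacion
--                 colores.append(pos)  #Añadimos esa posición (color) a la lista de colores
--             else:
--                 i+=1 #Color nuevo
--                 colores.append(i) #Añadimos el color nuevo a la lista de colores
--                 relacion.append(x) #Asociamos el index con el color que tenia en el cromosoma
--
--     return (len(relacion), colores) #Devolvemos el número de colores diferentes y los colores
-- ===== SOURCE B (Python) =====
-- def aplanaSolucion(solucion):
--     # color of x = number of distinct values occurring before x's first occurrence
--     colores = [len(set(solucion[:solucion.index(x)])) for x in solucion]
--     return (len(set(solucion)), colores)
-- ===== Notes on version B (the rewrite author's own statement) =====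
-- stated objective: simpler
-- what changed: Replaces A's incremental discover-and-emit loop (carried colores/relacion/i state with membership and index scans) by a stateless per-element closed form: each element's color is the number of distinct values in the prefix before its first occurrence, computed independently in one comprehension.
import Mathlib
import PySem

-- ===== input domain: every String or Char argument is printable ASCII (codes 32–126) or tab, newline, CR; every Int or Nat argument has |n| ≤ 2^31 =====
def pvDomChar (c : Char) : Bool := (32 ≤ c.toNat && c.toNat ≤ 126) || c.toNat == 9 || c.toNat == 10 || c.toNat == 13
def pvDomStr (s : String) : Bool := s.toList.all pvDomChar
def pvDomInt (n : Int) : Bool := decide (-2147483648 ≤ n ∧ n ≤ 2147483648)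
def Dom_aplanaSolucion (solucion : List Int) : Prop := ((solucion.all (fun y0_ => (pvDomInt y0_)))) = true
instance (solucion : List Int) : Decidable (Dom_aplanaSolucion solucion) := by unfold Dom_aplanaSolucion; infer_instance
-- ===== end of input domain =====

-- B replaces A's incremental discover-and-emit loop by a stateless per-element closed form:
-- each element's color is the number of distinct values before its first occurrence (simpler, not faster).

-- ===== PORT A =====
-- the loop state is (colores, relacion, i), exactly A's three variables
def aplanaSolucionLoop : List Int → List Int × List Int × Int → List Int × List Int × Int
  | [], st => st
  | x :: rest, (colores, relacion, i) =>
    if colores.length = 0 then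
      aplanaSolucionLoop rest (colores ++ [(0 : Int)], relacion ++ [x], 0)
    else if relacion.contains x then
      -- pos = relacion.index(x); guarded by 'x in relacion', so index? is some here
      aplanaSolucionLoop rest (colores ++ [(((PySem.List.index? relacion x).getD 0 : Nat) : Int)], relacion, i)
    else
      aplanaSolucionLoop rest (colores ++ [i + 1], relacion ++ [x], i + 1)

def aplanaSolucion (solucion : List Int) : Int × List Int :=
  let res := aplanaSolucionLoop solucion ([], [], 0)
  ((res.2.1.length : Int), res.1)

-- ===== PORT B =====
-- [len(set(solucion[:solucion.index(x)])) for x in solucion]; every x is drawn from the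
-- list itself, so solucion.index(x) never raises and index?.getD 0 is exact here
def aplanaSolucion_alt (solucion : List Int) : Int × List Int :=
  let colores := solucion.map (fun x =>
    ((PySem.Set.ofList (PySem.List.slice solucion none
        (some (((PySem.List.index? solucion x).getD 0 : Nat) : Int)))).length : Int))
  (((PySem.Set.ofList solucion).length : Int), colores)

-- ===== PRECONDITION & SPEC =====
def Spec_aplanaSolucion (solucion : List Int) (out : Int × List Int) : Prop := out = aplanaSolucion_alt solucion
instance (solucion : List Int) (out : Int × List Int) : Decidable (Spec_aplanaSolucion solucion out) := by unfold Spec_aplanaSolucion; infer_instance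

-- ===== CLAIM (what is proved, stated in full; the proofs are below) =====
def Claim_equal_aplanaSolucion : Prop := ∀ (solucion : List Int), Dom_aplanaSolucion solucion → Spec_aplanaSolucion solucion (aplanaSolucion solucion)

-- ===== LEMMAS AND PROOFS =====

-- folding Set.add only appends to the accumulator
theorem pv_foldl_add_prefix (l : List Int) : ∀ r : List Int, ∃ t, l.foldl PySem.Set.add r = r ++ t := by
  induction l with
  | nil => intro r; exact ⟨[], by simp⟩
  | cons x l ih =>
    intro r
    obtain ⟨t, ht⟩ := ih (PySem.Set.add r x)
    by_cases hx : x ∈ r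
    · refine ⟨t, ?_⟩
      rw [List.foldl_cons, ht]
      simp [PySem.Set.add, hx]
    · refine ⟨x :: t, ?_⟩
      rw [List.foldl_cons, ht]
      simp [PySem.Set.add, hx]

-- an index already assigned never changes as relacion grows
theorem pv_index_stable {r : List Int} {y : Int} (l : List Int) (hy : y ∈ r) :
    PySem.List.index? (l.foldl PySem.Set.add r) y = PySem.List.index? r y := by
  obtain ⟨t, ht⟩ := pv_foldl_add_prefix l r
  rw [ht, PySem.List.index?_append_of_mem t hy]

-- invariant for A's loop: from a consistent non-initial state it emits, for each remaining
-- element, that element's index in the final relacion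
theorem pv_loopA (rest : List Int) : ∀ (c r : List Int) (i : Int), c ≠ [] →
    i = (r.length : Int) - 1 →
    aplanaSolucionLoop rest (c, r, i) =
      (c ++ rest.map (fun y => (((PySem.List.index? (rest.foldl PySem.Set.add r) y).getD 0 : Nat) : Int)),
       rest.foldl PySem.Set.add r,
       ((rest.foldl PySem.Set.add r).length : Int) - 1) := by
  induction rest with
  | nil => intro c r i hc hi; simp [aplanaSolucionLoop, hi]
  | cons x rest ih =>
    intro c r i hc hi
    have hclen : ¬ c.length = 0 := by simpa [List.length_eq_zero_iff] using hc
    by_cases h : x ∈ r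
    · have hadd : PySem.Set.add r x = r := by simp [PySem.Set.add, h]
      rw [show aplanaSolucionLoop (x :: rest) (c, r, i)
            = aplanaSolucionLoop rest
                (c ++ [(((PySem.List.index? r x).getD 0 : Nat) : Int)], r, i) by
            simp [aplanaSolucionLoop, hclen, h]]
      rw [ih _ r i (by simp) hi]
      simp only [List.foldl_cons, hadd, List.map_cons]
      rw [pv_index_stable rest h]
      simp
    · have hadd : PySem.Set.add r x = r ++ [x] := by simp [PySem.Set.add, h]
      rw [show aplanaSolucionLoop (x :: rest) (c, r, i)
            = aplanaSolucionLoop rest (c ++ [i + 1], r ++ [x], i + 1) by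
            simp [aplanaSolucionLoop, hclen, h]]
      rw [ih _ (r ++ [x]) (i + 1) (by simp)
            (by rw [hi]; push_cast [List.length_append, List.length_singleton]; ring)]
      have hidx : PySem.List.index? (rest.foldl PySem.Set.add (r ++ [x])) x = some r.length := by
        rw [pv_index_stable rest (by simp), PySem.List.index?_append_singleton_self r x h]
      simp only [List.foldl_cons, hadd, List.map_cons]
      rw [hidx]
      simp [hi]

-- B's closed form: the index of x in the running dedup equals the number of distinct
-- values (on top of the accumulator r) in the prefix of t before x's first occurrence
theorem pv_color_count (t : List Int) : ∀ (r : List Int) (x : Int), x ∉ r → x ∈ t →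
    PySem.List.index? (t.foldl PySem.Set.add r) x
      = some ((List.take ((PySem.List.index? t x).getD 0) t).foldl PySem.Set.add r).length := by
  induction t with
  | nil => intro r x _ hx; cases hx
  | cons z t ih =>
    intro r x hxr hx
    by_cases hz : z = x
    · subst hz
      have hadd : PySem.Set.add r z = r ++ [z] := by simp [PySem.Set.add, hxr]
      rw [List.foldl_cons, hadd, pv_index_stable t (by simp),
          PySem.List.index?_append_singleton_self r z hxr,
          PySem.List.index?_cons_self]
      simp
    · have hxt : x ∈ t := by
        rcases List.mem_cons.1 hx with h | h
        · exact absurd h.symm hz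
        · exact h
      obtain ⟨i, hi⟩ := Option.isSome_iff_exists.1
        ((PySem.List.index?_isSome_iff (xs := t) (v := x)).2 hxt)
      have hxrz : x ∉ PySem.Set.add r z := by
        simp [PySem.Set.add]
        split_ifs with h
        · exact hxr
        · simp [hxr, Ne.symm hz]
      rw [List.foldl_cons, ih (PySem.Set.add r z) x hxrz hxt,
          PySem.List.index?_cons_of_ne t hz, hi]
      simp [List.foldl_cons]

-- ===== VERDICT (by name: the statement is the Claim_ definition above) =====
theorem aplanaSolucion_spec : Claim_equal_aplanaSolucion := by
  unfold Claim_equal_aplanaSolucion Spec_aplanaSolucion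
  intro solucion _
  cases solucion with
  | nil => rfl
  | cons x rest =>
    have hfold : PySem.Set.ofList (x :: rest) = rest.foldl PySem.Set.add [x] := by
      rw [PySem.Set.ofList_eq_foldl, List.foldl_cons]
      simp [PySem.Set.add]
    have hx0 : PySem.List.index? (PySem.Set.ofList (x :: rest)) x = some 0 := by
      rw [hfold, pv_index_stable rest (by simp)]
      exact PySem.List.index?_cons_self x []
    have hB : aplanaSolucion_alt (x :: rest)
        = (((PySem.Set.ofList (x :: rest)).length : Int),
           (x :: rest).map (fun y => ((PySem.Set.ofList
             (List.take ((PySem.List.index? (x :: rest) y).getD 0) (x :: rest))).length : Int))) := by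
      unfold aplanaSolucion_alt
      refine congrArg (Prod.mk _) ?_
      refine List.map_congr_left ?_
      intro y _
      rw [PySem.List.slice_to_natCast]
    have hA : aplanaSolucion (x :: rest)
        = (((PySem.Set.ofList (x :: rest)).length : Int),
           [(0 : Int)] ++ rest.map (fun y =>
             (((PySem.List.index? (PySem.Set.ofList (x :: rest)) y).getD 0 : Nat) : Int))) := by
      unfold aplanaSolucion
      rw [show aplanaSolucionLoop (x :: rest) ([], [], 0)
            = aplanaSolucionLoop rest ([(0 : Int)], [x], 0) by simp [aplanaSolucionLoop]]
      rw [pv_loopA rest [(0 : Int)] [x] 0 (by simp) (by simp), ← hfold]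
    have hpoint : ∀ y ∈ (x :: rest),
        (((PySem.List.index? (PySem.Set.ofList (x :: rest)) y).getD 0 : Nat) : Int)
          = ((PySem.Set.ofList
              (List.take ((PySem.List.index? (x :: rest) y).getD 0) (x :: rest))).length : Int) := by
      intro y hy
      have hc := pv_color_count (x :: rest) [] y (by simp) hy
      rw [PySem.Set.ofList_eq_foldl, PySem.Set.ofList_eq_foldl, hc]
      rfl
    rw [hA, hB]
    refine congrArg (Prod.mk _) ?_
    rw [List.map_cons, ← hpoint x (by simp), hx0]
    exact congrArg (List.cons _)
      (List.map_congr_left fun y hy => hpoint y (List.mem_cons_of_mem x hy))
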